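-- pv_equiv track=rewrite | github.com/cognitaia2025-hub/Podiskin_solution | backend/agents/sub_agent_operator/utils/formatters.py | format_appointment_list
-- ===== SOURCE A (Python) =====
-- from typing import List, Dict, Any
--
-- def format_appointment_list(appointments: List[Dict[str, Any]]) -> str:
--     """
--     Formatea una lista de citas en texto estructurado.
--
--     Args:
--         appointments: Lista de citas
--
--     Returns:
--         String formateado
--     """
--     if not appointments:
--         return "No se encontraron citas."
--
--     # Agrupar por fecha
--     by_date = {}
--     for apt in appointments:
--         fecha = apt.get("fecha", "Sin fecha")
--         if fecha not in by_date:
--             by_date[fecha] = []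
--         by_date[fecha].append(apt)
--
--     # Formatear
--     lines = [f"Citas encontradas: {len(appointments)}\n"]
--
--     for fecha in sorted(by_date.keys()):
--         citas = by_date[fecha]
--         lines.append(f"\n=== {fecha} ===")
--
--         for cita in sorted(citas, key=lambda x: x.get("hora", "")):
--             hora = cita.get("hora", "??:??")
--             paciente = cita.get("paciente_nombre", "Desconocido")
--             tratamiento = cita.get("tratamiento", "N/A")
--             estado = cita.get("estado", "N/A")
--
--             lines.append(f"  {hora} - {paciente} ({tratamiento}) [{estado}]")
--
--     return "\n".join(lines)
-- ===== SOURCE B (Python) =====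
-- def _fecha(a):
--     return a.get("fecha", "Sin fecha")
--
--
-- def _line(c):
--     return (f"  {c.get('hora', '??:??')} - {c.get('paciente_nombre', 'Desconocido')}"
--             f" ({c.get('tratamiento', 'N/A')}) [{c.get('estado', 'N/A')}]")
--
--
-- def format_appointment_list(appointments):
--     if not appointments:
--         return "No se encontraron citas."
--     lines = [f"Citas encontradas: {len(appointments)}\n"]
--     for fecha in sorted({_fecha(a) for a in appointments}):
--         group = sorted((a for a in appointments if _fecha(a) == fecha),
--                        key=lambda x: x.get("hora", ""))
--         lines += [f"\n=== {fecha} ==="] + [_line(c) for c in group]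
--     return "\n".join(lines)
-- ===== Notes on version B (the rewrite author's own statement) =====
-- stated objective: simpler
-- what changed: B drops A's dict-building grouping pass entirely: it sorts the distinct dates once and, for each date, filters and sorts the matching appointments directly from the input list, emitting the group header and lines in one comprehension-style sweep.
import Mathlib
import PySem

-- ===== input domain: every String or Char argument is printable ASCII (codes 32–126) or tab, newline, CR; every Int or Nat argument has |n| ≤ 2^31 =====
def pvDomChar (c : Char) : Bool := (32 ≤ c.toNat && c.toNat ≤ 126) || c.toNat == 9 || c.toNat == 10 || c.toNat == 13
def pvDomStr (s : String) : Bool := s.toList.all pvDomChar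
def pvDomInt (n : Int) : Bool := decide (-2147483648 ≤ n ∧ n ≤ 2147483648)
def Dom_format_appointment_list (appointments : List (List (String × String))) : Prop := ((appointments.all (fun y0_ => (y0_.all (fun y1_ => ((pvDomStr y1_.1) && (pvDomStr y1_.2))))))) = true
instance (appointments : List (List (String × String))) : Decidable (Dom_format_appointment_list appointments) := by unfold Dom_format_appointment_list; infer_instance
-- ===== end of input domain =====

-- B replaces A's dict-based grouping with sorting the distinct dates and filtering the appointments per date (simpler decomposition, same output).

-- ===== PORT A =====
-- apt.get(k, dflt) on an association-list dict (first match wins)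
def pyGet (d : List (String × String)) (k dflt : String) : String :=
  (PySem.Dict.mk d).getD k dflt

def format_appointment_list (appointments : List (List (String × String))) : String :=
  if appointments = [] then "No se encontraron citas."
  else
    let by_date := appointments.foldl (fun d apt =>
      let fecha := pyGet apt "fecha" "Sin fecha"
      let d := if d.contains fecha then d else d.insert fecha ([] : List (List (String × String)))
      d.modify fecha [] (fun l => l ++ [apt])) PySem.Dict.empty
    let lines := ["Citas encontradas: " ++ PySem.Int.toStr (appointments.length : Int) ++ "\n"]
    let lines := (PySem.List.sorted by_date.keys (fun x => x) false).foldl (fun lines fecha =>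
      -- by_date[fecha]: fecha is always a key of by_date, so the [] default is never used
      let citas := by_date.getD fecha []
      let lines := lines ++ ["\n=== " ++ fecha ++ " ==="]
      (PySem.List.sorted citas (fun x => pyGet x "hora" "") false).foldl (fun lines cita =>
        let hora := pyGet cita "hora" "??:??"
        let paciente := pyGet cita "paciente_nombre" "Desconocido"
        let tratamiento := pyGet cita "tratamiento" "N/A"
        let estado := pyGet cita "estado" "N/A"
        lines ++ ["  " ++ hora ++ " - " ++ paciente ++ " (" ++ tratamiento ++ ") [" ++ estado ++ "]"]) lines) lines
    PySem.Str.join "\n" lines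

-- ===== PORT B =====
def fa_fecha (a : List (String × String)) : String := pyGet a "fecha" "Sin fecha"

def fa_line (c : List (String × String)) : String :=
  "  " ++ pyGet c "hora" "??:??" ++ " - " ++ pyGet c "paciente_nombre" "Desconocido" ++
  " (" ++ pyGet c "tratamiento" "N/A" ++ ") [" ++ pyGet c "estado" "N/A" ++ "]"

def format_appointment_list_alt (appointments : List (List (String × String))) : String :=
  if appointments = [] then "No se encontraron citas."
  else
    let lines := (PySem.List.sorted (PySem.Set.ofList (appointments.map fa_fecha)) (fun x => x) false).foldl
      (fun lines fecha =>
        lines ++ ("\n=== " ++ fecha ++ " ===") ::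
          (PySem.List.sorted (appointments.filter (fun a => fa_fecha a == fecha))
            (fun x => pyGet x "hora" "") false).map fa_line)
      ["Citas encontradas: " ++ PySem.Int.toStr (appointments.length : Int) ++ "\n"]
    PySem.Str.join "\n" lines

-- ===== PRECONDITION & SPEC =====
def Spec_format_appointment_list (appointments : List (List (String × String))) (out : String) : Prop := out = format_appointment_list_alt appointments
instance (appointments : List (List (String × String))) (out : String) : Decidable (Spec_format_appointment_list appointments out) := by unfold Spec_format_appointment_list; infer_instance

-- ===== CLAIM (what is proved, stated in full; the proofs are below) =====
def Claim_equal_format_appointment_list : Prop := ∀ (appointments : List (List (String × String))), Dom_format_appointment_list appointments → Spec_format_appointment_list appointments (format_appointment_list appointments)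

-- ===== LEMMAS AND PROOFS =====

-- A's per-appointment dict update (setdefault-to-[] then append) is one modify.
theorem step_eq (d : PySem.Dict String (List (List (String × String)))) (apt : List (String × String)) :
    (if d.contains (fa_fecha apt) then d
     else d.insert (fa_fecha apt) ([] : List (List (String × String)))).modify
      (fa_fecha apt) [] (fun l => l ++ [apt])
    = d.modify (fa_fecha apt) [] (fun l => l ++ [apt]) := by
  by_cases h : d.contains (fa_fecha apt)
  · simp [h]
  · simp only [h, Bool.false_eq_true, if_false]
    rw [PySem.Dict.modify, PySem.Dict.modify, PySem.Dict.getD_insert_self,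
      PySem.Dict.insert_insert_self, PySem.Dict.getD_of_not_contains d [] (by simpa using h)]

-- A's group of a date is B's filter of the appointment list.
theorem getD_group (apts : List (List (String × String))) (c : String) :
    (apts.foldl (fun d apt => d.modify (fa_fecha apt) [] (fun l => l ++ [apt])) PySem.Dict.empty).getD c []
    = apts.filter (fun a => fa_fecha a == c) := by
  have h := PySem.Dict.getD_foldl_modify_append (apts.map (fun a => (fa_fecha a, a)))
    (PySem.Dict.empty : PySem.Dict String (List (List (String × String)))) c
  rw [List.foldl_map] at h
  simp only [List.filter_map, Function.comp_def] at h
  simpa [Function.comp_def] using h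

-- A's dict keys are B's distinct-dates set, in the same (first-occurrence) order.
theorem keys_group (apts : List (List (String × String))) :
    (apts.foldl (fun d apt => d.modify (fa_fecha apt) [] (fun l => l ++ [apt])) PySem.Dict.empty).keys
    = PySem.Set.ofList (apts.map fa_fecha) := by
  rw [PySem.Dict.keys_foldl_modify_key apts fa_fecha [] (fun _ apt l => l ++ [apt])]
  simp [PySem.Set.update_nil_left]

theorem format_eq (apts : List (List (String × String))) :
    format_appointment_list apts = format_appointment_list_alt apts := by
  unfold format_appointment_list format_appointment_list_alt
  by_cases h : apts = []
  · simp [h]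
  · simp only [h, if_false]
    have hstep : (fun (d : PySem.Dict String (List (List (String × String)))) apt =>
        let fecha := pyGet apt "fecha" "Sin fecha"
        let d' := if d.contains fecha then d else d.insert fecha ([] : List (List (String × String)))
        d'.modify fecha [] (fun l => l ++ [apt]))
        = (fun d apt => d.modify (fa_fecha apt) [] (fun l => l ++ [apt])) := by
      funext d apt
      exact step_eq d apt
    rw [hstep, keys_group]
    congr 1
    congr 1
    funext lines fecha
    rw [getD_group]
    unfold fa_line
    rw [PySem.List.foldl_append_singleton_eq_map]
    rw [List.append_assoc]
    rfl

-- ===== VERDICT (by name: the statement is the Claim_ definition above) =====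
theorem format_appointment_list_spec : Claim_equal_format_appointment_list := by
  intro apts _
  unfold Spec_format_appointment_list
  exact format_eq apts
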